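-- pv_equiv track=rewrite | github.com/puyopop/atcoder-workspace | abc098/B/main.py | solve
-- ===== SOURCE A (Python) =====
-- def solve(N: int, S: str):
--     h = [set()]
--     for c in S:
--         h.append(h[-1] | set(c))
--     t = [set()]
--     for c in reversed(S):
--         t.append(t[-1] | set(c))
--     return max(len(hh & tt) for hh, tt in zip(h, reversed(t)))
-- ===== SOURCE B (Python) =====
-- def solve(N: int, S: str):
--     return max(len(set(S[:i]) & set(S[i:])) for i in range(len(S) + 1))
-- ===== Notes on version B (the rewrite author's own statement) =====
-- stated objective: simpler
-- what changed: Drops A's incremental prefix/suffix set tables and the zip over them: B directly computes len(set(S[:i]) & set(S[i:])) for each split point i in one comprehension.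
import Mathlib
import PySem

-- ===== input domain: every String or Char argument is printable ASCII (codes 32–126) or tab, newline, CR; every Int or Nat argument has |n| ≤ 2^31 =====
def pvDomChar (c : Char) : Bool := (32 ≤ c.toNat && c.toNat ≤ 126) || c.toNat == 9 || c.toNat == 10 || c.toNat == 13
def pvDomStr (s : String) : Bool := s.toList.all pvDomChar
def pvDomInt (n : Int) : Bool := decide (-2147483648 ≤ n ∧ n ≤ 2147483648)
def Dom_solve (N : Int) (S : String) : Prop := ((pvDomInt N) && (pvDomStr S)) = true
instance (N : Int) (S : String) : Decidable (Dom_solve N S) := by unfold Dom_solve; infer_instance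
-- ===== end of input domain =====

-- B replaces A's incrementally-built prefix/suffix set tables with a direct per-split
-- recomputation len(set(S[:i]) & set(S[i:])) — simpler, no tables (objective: simpler).


-- ===== PORT A =====
-- h = [set()]; for c in S: h.append(h[-1] | set(c))
def solveStep (h : List (PySem.Set Char)) (c : Char) : List (PySem.Set Char) :=
  h ++ [PySem.Set.union (PySem.List.pyGetD h (-1) PySem.Set.empty) (PySem.Set.ofList [c])]

def solve (N : Int) (S : String) : Int :=
  let h := S.toList.foldl solveStep [PySem.Set.empty]
  let t := S.toList.reverse.foldl solveStep [PySem.Set.empty]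
  -- max(...) over zip(h, reversed(t)); the zipped list is always nonempty (h has ≥ 1
  -- element), so Python's max never raises and the .getD 0 default is never used
  (PySem.List.max? ((h.zip t.reverse).map
      (fun p => PySem.Set.len (PySem.Set.inter p.1 p.2))) (fun x => x)).getD 0

-- ===== PORT B =====
-- max(len(set(S[:i]) & set(S[i:])) for i in range(len(S)+1)); nonempty for the same reason
def solve_alt (N : Int) (S : String) : Int :=
  let L := S.toList
  (PySem.List.max? ((PySem.List.pyRange 0 ((L.length : Int) + 1) 1).map (fun i =>
      PySem.Set.len (PySem.Set.inter
        (PySem.Set.ofList (PySem.List.slice L none (some i)))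
        (PySem.Set.ofList (PySem.List.slice L (some i) none))))) (fun x => x)).getD 0

-- ===== PRECONDITION & SPEC =====
def Spec_solve (N : Int) (S : String) (out : Int) : Prop := out = solve_alt N S
instance (N : Int) (S : String) (out : Int) : Decidable (Spec_solve N S out) := by unfold Spec_solve; infer_instance

-- ===== CLAIM (what is proved, stated in full; the proofs are below) =====
def Claim_equal_solve : Prop := ∀ (N : Int) (S : String), Dom_solve N S → Spec_solve N S (solve N S)

-- ===== LEMMAS AND PROOFS =====

theorem pyGetD_append_neg_one {α : Type} (ys : List α) (z d : α) :
    PySem.List.pyGetD (ys ++ [z]) (-1) d = z := by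
  simp [PySem.List.pyGetD, PySem.List.pyGet?, PySem.List.pyIdx?]

-- A's table over a word M is the list of prefix character-sets of M
theorem table_eq (M : List Char) :
    M.foldl solveStep [PySem.Set.empty] =
      (List.range (M.length + 1)).map (fun i => PySem.Set.ofList (M.take i)) := by
  induction M using List.reverseRecOn with
  | nil => simp [PySem.Set.ofList, PySem.Set.empty, List.range_succ]
  | append_singleton M c ih =>
    rw [List.foldl_append, ih]
    have hlast : (List.range (M.length + 1)).map (fun i => PySem.Set.ofList (M.take i)) =
        ((List.range M.length).map (fun i => PySem.Set.ofList (M.take i))) ++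
          [PySem.Set.ofList M] := by
      rw [List.range_succ]; simp
    simp only [List.foldl_cons, List.foldl_nil, solveStep, hlast, pyGetD_append_neg_one]
    have hu : (PySem.Set.ofList M).union (PySem.Set.ofList [c]) = PySem.Set.ofList (M ++ [c]) := by
      have h1 : PySem.Set.ofList (M ++ [c]) = PySem.Set.add (PySem.Set.ofList M) c := by
        simp [PySem.Set.ofList_eq_foldl]
      rw [h1]; rfl
    have key : (List.range ((M ++ [c]).length + 1)).map
          (fun i => PySem.Set.ofList ((M ++ [c]).take i)) =
        (List.range M.length).map (fun i => PySem.Set.ofList (M.take i)) ++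
          [PySem.Set.ofList M] ++ [PySem.Set.ofList (M ++ [c])] := by
      have hlen : (M ++ [c]).length = M.length + 1 := by simp
      rw [hlen, List.range_succ, List.range_succ, List.map_append, List.map_append]
      congr 1
      congr 1
      · apply List.map_congr_left
        intro i hi
        rw [List.mem_range] at hi
        rw [List.take_append_of_le_length (by omega)]
      · rw [List.map_singleton, List.take_append_of_le_length (le_refl _), List.take_length]
      · rw [List.map_singleton, List.take_of_length_le (by simp)]
    rw [hu, key]

-- |s ∩ set(u)| depends on set(u) only through membership
theorem len_inter_congr (s : PySem.Set Char) (u v : List Char)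
    (h : ∀ x, x ∈ u ↔ x ∈ v) :
    PySem.Set.len (PySem.Set.inter s (PySem.Set.ofList u)) =
      PySem.Set.len (PySem.Set.inter s (PySem.Set.ofList v)) := by
  have heq : PySem.Set.inter s (PySem.Set.ofList u) = PySem.Set.inter s (PySem.Set.ofList v) := by
    show s.filter (fun x => (PySem.Set.ofList u).contains x) =
      s.filter (fun x => (PySem.Set.ofList v).contains x)
    apply List.filter_congr
    intro x _
    simp [PySem.Set.mem_ofList, h x]
  rw [heq]

-- the two lists whose max is taken are equal
theorem lens_eq (L : List Char) :
    ((L.foldl solveStep [PySem.Set.empty]).zip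
        (L.reverse.foldl solveStep [PySem.Set.empty]).reverse).map
      (fun p => PySem.Set.len (PySem.Set.inter p.1 p.2)) =
    (PySem.List.pyRange 0 ((L.length : Int) + 1) 1).map (fun i =>
      PySem.Set.len (PySem.Set.inter
        (PySem.Set.ofList (PySem.List.slice L none (some i)))
        (PySem.Set.ofList (PySem.List.slice L (some i) none)))) := by
  rw [table_eq, table_eq]
  apply List.ext_getElem
  · simp [PySem.List.length_pyRange_one]
  · intro i h1 h2
    simp only [List.getElem_map, List.getElem_zip, List.getElem_reverse, List.getElem_range,
      PySem.List.getElem_pyRange_one, List.length_map, List.length_reverse,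
      List.length_range, zero_add]
    rw [PySem.List.slice_to_natCast, PySem.List.slice_from_natCast]
    have hi : i < L.length + 1 := by
      simpa using h1
    have hidx : L.length + 1 - 1 - i = L.length - i := by omega
    rw [hidx]
    have htake : L.reverse.take (L.length - i) = (L.drop i).reverse := by
      rw [List.reverse_drop]
    rw [htake]
    apply len_inter_congr
    intro x
    simp

-- ===== VERDICT (by name: the statement is the Claim_ definition above) =====
theorem solve_spec : Claim_equal_solve := by
  intro N S _
  show solve N S = solve_alt N S
  simp only [solve, solve_alt, lens_eq]
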